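-- pv_equiv track=rewrite | github.com/klenwell/code-challenges | python/advent-of-code/2022/day-05.py | parse_crates_in_row
-- ===== SOURCE A (Python) =====
-- def parse_crates_in_row(line):
--     columns = []
--     step = 4
--     for n in range(1, 35, step):
--         try:
--             crate = line[n]
--         except IndexError:
--             crate = ' '
--         columns.append(crate)
--     return columns
-- ===== SOURCE B (Python) =====
-- def parse_crates_in_row(line):
--     padded = line.ljust(35)
--     return list(padded[1:35:4])
-- ===== Notes on version B (the rewrite author's own statement) =====
-- stated objective: simpler
-- what changed: Replaces the nine-iteration loop with try/except IndexError by padding the line with spaces to length 35 (ljust) and taking a single strided slice [1:35:4].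
import Mathlib
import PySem

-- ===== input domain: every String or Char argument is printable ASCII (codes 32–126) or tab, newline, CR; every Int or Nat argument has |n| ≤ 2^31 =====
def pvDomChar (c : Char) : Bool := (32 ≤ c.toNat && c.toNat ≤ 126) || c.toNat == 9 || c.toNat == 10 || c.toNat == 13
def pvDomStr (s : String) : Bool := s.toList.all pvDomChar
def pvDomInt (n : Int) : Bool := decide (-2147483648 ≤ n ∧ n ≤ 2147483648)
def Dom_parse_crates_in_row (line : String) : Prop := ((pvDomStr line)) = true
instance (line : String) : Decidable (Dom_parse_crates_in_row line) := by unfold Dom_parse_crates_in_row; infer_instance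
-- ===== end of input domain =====

-- B replaces A's try/except loop over range(1,35,4) by padding the line to length 35
-- and taking one strided slice (objective: simpler); same return value on every input.

-- ===== PORT A =====
def parse_crates_in_row (line : String) : List String :=
  (PySem.List.pyRange 1 35 4).foldl
    (fun columns n =>
      columns ++ [match PySem.Str.pyGet? line n with    -- try line[n] except IndexError: ' '
        | some c => String.ofList [c]
        | none => " "]) []

-- ===== PORT B =====
def parse_crates_in_row_alt (line : String) : List String :=
  -- padded = line.ljust(35): pad with spaces up to length 35 (Nat subtraction gives 0 when long enough — exact)
  let padded := line.toList ++ List.replicate (35 - line.toList.length) ' '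
  -- list(padded[1:35:4]); the step is 4 ≠ 0, so slice? never returns none and getD [] is unreachable
  ((PySem.List.slice? padded (some 1) (some 35) 4).getD []).map (fun c => String.ofList [c])

-- ===== PRECONDITION & SPEC =====
def Spec_parse_crates_in_row (line : String) (out : List String) : Prop := out = parse_crates_in_row_alt line
instance (line : String) (out : List String) : Decidable (Spec_parse_crates_in_row line out) := by unfold Spec_parse_crates_in_row; infer_instance

-- ===== CLAIM (what is proved, stated in full; the proofs are below) =====
def Claim_equal_parse_crates_in_row : Prop := ∀ (line : String), Dom_parse_crates_in_row line → Spec_parse_crates_in_row line (parse_crates_in_row line)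

-- ===== LEMMAS AND PROOFS =====

-- The strided slice of the padded line is the 9 characters at indices 1,5,…,33.
theorem pv_slice_eval (xs : List Char) (h : 35 ≤ xs.length) :
    PySem.List.slice? xs (some 1) (some 35) 4 =
      some ((List.range 9).filterMap (fun k => xs[(1 + 4*k)]?)) := by
  have h35 : min (35:Int) (xs.length:Int) = 35 := by omega
  have h1 : min (1:Int) (xs.length:Int) = 1 := by omega
  simp [PySem.List.slice?, PySem.List.sliceIndices, h35, h1]
  apply List.filterMap_congr
  intro k hk
  congr 1

-- Reading the padded line at an in-bounds index is the original char or a pad space.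
theorem pv_pad_get (cs : List Char) (n : Nat) (hn : n < 35) :
    (cs ++ List.replicate (35 - cs.length) ' ')[n]? =
      some (match cs[n]? with | some c => c | none => ' ') := by
  by_cases h : n < cs.length
  · rw [List.getElem?_append_left h]
    simp [List.getElem?_eq_getElem h]
  · rw [List.getElem?_append_right (by omega)]
    have : cs[n]? = none := by simpa using (by omega : cs.length ≤ n)
    simp [this, List.getElem?_replicate]
    omega


-- One crate cell: A's try/except result equals the char B reads at the same position.
theorem pv_cell (line : String) (i : Int) (n : Nat) (h : i = (n : Int)) :
    (match PySem.Str.pyGet? line i with | some c => String.ofList [c] | none => " ") =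
      String.ofList [match line.toList[n]? with | some c => c | none => ' '] := by
  subst h
  have : PySem.Str.pyGet? line (n : Int) = line.toList[n]? := by
    simp [PySem.Str.pyGet?, PySem.Chars.pyGet?, pysem]
  rw [this]
  cases line.toList[n]? <;> rfl

-- ===== VERDICT (by name: the statement is the Claim_ definition above) =====
theorem parse_crates_in_row_spec : Claim_equal_parse_crates_in_row := by
  intro line _
  unfold Spec_parse_crates_in_row parse_crates_in_row parse_crates_in_row_alt
  have hrange : PySem.List.pyRange 1 35 4 = [1, 5, 9, 13, 17, 21, 25, 29, 33] := by decide
  have hlen : 35 ≤ (line.toList ++ List.replicate (35 - line.toList.length) ' ').length := by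
    simp; omega
  rw [hrange]
  show _ = ((PySem.List.slice? (line.toList ++ List.replicate (35 - line.toList.length) ' ')
      (some 1) (some 35) 4).getD []).map (fun c => String.ofList [c])
  rw [pv_slice_eval _ hlen]
  have e9 : List.range 9 = [0, 1, 2, 3, 4, 5, 6, 7, 8] := by decide
  rw [e9]
  simp only [List.filterMap_cons, List.filterMap_nil, Option.getD_some,
    pv_pad_get line.toList (1 + 4 * 0) (by omega), pv_pad_get line.toList (1 + 4 * 1) (by omega),
    pv_pad_get line.toList (1 + 4 * 2) (by omega), pv_pad_get line.toList (1 + 4 * 3) (by omega),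
    pv_pad_get line.toList (1 + 4 * 4) (by omega), pv_pad_get line.toList (1 + 4 * 5) (by omega),
    pv_pad_get line.toList (1 + 4 * 6) (by omega), pv_pad_get line.toList (1 + 4 * 7) (by omega),
    pv_pad_get line.toList (1 + 4 * 8) (by omega)]
  simp only [List.foldl, List.nil_append, List.map]
  rw [pv_cell line 1 (1 + 4 * 0) (by norm_num), pv_cell line 5 (1 + 4 * 1) (by norm_num),
    pv_cell line 9 (1 + 4 * 2) (by norm_num), pv_cell line 13 (1 + 4 * 3) (by norm_num),
    pv_cell line 17 (1 + 4 * 4) (by norm_num), pv_cell line 21 (1 + 4 * 5) (by norm_num),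
    pv_cell line 25 (1 + 4 * 6) (by norm_num), pv_cell line 29 (1 + 4 * 7) (by norm_num),
    pv_cell line 33 (1 + 4 * 8) (by norm_num)]
  rfl
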